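-- pv_equiv track=rewrite | github.com/JasonZuu/MedTPE | tpe/vocab_modify_tpe.py | cnt_overlaps
-- ===== SOURCE A (Python) =====
-- from collections import defaultdict, Counter, OrderedDict
--
-- def cnt_overlaps(n_tokens, Fn_tok, max_n):
--     """
--     Count the overlaps between n-grams and their prefixes.
--     """
--     overlaps = defaultdict(lambda: defaultdict(int))
--     prefix_to_targets = defaultdict(list)
--
--     # Build prefix-to-n-gram (t' -> list of its prefixes)
--     for t_prime in n_tokens:
--         tokens = t_prime.split()
--         for k in range(1, min(len(tokens), max_n)):
--             prefix = ' '.join(tokens[:k])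
--             prefix_to_targets[prefix].append(t_prime)
--
--     # Match each n-gram t to all t' it is a prefix of
--     for t in n_tokens:
--         for t_prime in prefix_to_targets.get(t, []):
--             overlaps[t][t_prime] = Fn_tok[t_prime]
--
--     return overlaps
-- ===== SOURCE B (Python) =====
-- def cnt_overlaps(n_tokens, Fn_tok, max_n):
--     """
--     Brute-force alternative: test every (t, t_prime) pair directly against a
--     precomputed list of prefixes, with no prefix-to-targets index.
--     """
--     def prefixes(t_prime):
--         toks = t_prime.split()
--         return [' '.join(toks[:k]) for k in range(1, min(len(toks), max_n))]
--
--     pref = [(t2, prefixes(t2)) for t2 in n_tokens]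
--     out = {}
--     for t in n_tokens:
--         inner = {t2: Fn_tok[t2] for t2, ps in pref if t in ps}
--         if inner:
--             out[t] = inner
--     return out
-- ===== Notes on version B (the rewrite author's own statement) =====
-- stated objective: simpler
-- what changed: B drops A's prefix-to-targets index and its two-phase build-then-match structure: it precomputes each token's prefix list once and fills the result with a direct dict comprehension over all (t, t') pairs, testing membership of t in t''s prefixes.
import Mathlib
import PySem

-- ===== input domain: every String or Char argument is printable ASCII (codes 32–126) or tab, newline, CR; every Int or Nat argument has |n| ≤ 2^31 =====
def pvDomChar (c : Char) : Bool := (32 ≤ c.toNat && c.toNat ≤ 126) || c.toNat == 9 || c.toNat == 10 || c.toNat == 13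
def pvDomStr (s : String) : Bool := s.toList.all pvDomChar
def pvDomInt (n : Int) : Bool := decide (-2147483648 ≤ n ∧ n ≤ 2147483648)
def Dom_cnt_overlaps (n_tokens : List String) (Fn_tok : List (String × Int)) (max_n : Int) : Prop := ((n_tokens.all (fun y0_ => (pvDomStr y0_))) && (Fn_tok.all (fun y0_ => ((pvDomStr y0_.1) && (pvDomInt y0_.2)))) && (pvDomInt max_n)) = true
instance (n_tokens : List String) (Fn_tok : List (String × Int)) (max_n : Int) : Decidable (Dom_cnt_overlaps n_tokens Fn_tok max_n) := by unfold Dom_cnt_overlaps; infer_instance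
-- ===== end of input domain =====

-- B replaces A's prefix-to-targets index and two-phase build-then-match with a direct
-- pairwise prefix-membership scan (objective: simpler; not faster).

-- ===== PORT A =====
-- Fn_tok[t'] is ported as getD … 0; Pre_ excludes inputs where the key is missing (Python: KeyError).
def cnt_overlaps (n_tokens : List String) (Fn_tok : List (String × Int)) (max_n : Int) : List (String × List (String × Int)) :=
  let ptt : PySem.Dict String (List String) :=
    n_tokens.foldl (fun d t' =>
      let toks := PySem.Str.split₀ t'
      (PySem.List.pyRange 1 (min (toks.length : Int) max_n) 1).foldl
        (fun d k =>
          let p := PySem.Str.join " " (PySem.List.slice toks none (some k))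
          d.modify p [] (· ++ [t'])) d)
      PySem.Dict.empty
  let ov : PySem.Dict String (PySem.Dict String Int) :=
    n_tokens.foldl (fun ov t =>
      (ptt.getD t []).foldl (fun ov t' =>
        ov.modify t PySem.Dict.empty (fun inner => inner.insert t' ((PySem.Dict.mk Fn_tok).getD t' 0))) ov)
      PySem.Dict.empty
  ov.items.map (fun p => (p.1, p.2.items))

-- ===== PORT B =====
-- helper `prefixes` of Source B (also used by Pre_ to state where Python raises)
def pvPrefixes (max_n : Int) (t' : String) : List String :=
  let toks := PySem.Str.split₀ t'
  (PySem.List.pyRange 1 (min (toks.length : Int) max_n) 1).map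
    (fun k => PySem.Str.join " " (PySem.List.slice toks none (some k)))

def cnt_overlaps_alt (n_tokens : List String) (Fn_tok : List (String × Int)) (max_n : Int) : List (String × List (String × Int)) :=
  let pref := n_tokens.map (fun t2 => (t2, pvPrefixes max_n t2))
  let out : PySem.Dict String (PySem.Dict String Int) :=
    n_tokens.foldl (fun out t =>
      let inner : PySem.Dict String Int :=
        pref.foldl (fun inner p =>
          if p.2.contains t then inner.insert p.1 ((PySem.Dict.mk Fn_tok).getD p.1 0) else inner)
          PySem.Dict.empty
      if inner.size == 0 then out else out.insert t inner)
      PySem.Dict.empty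
  out.items.map (fun p => (p.1, p.2.items))

-- ===== PRECONDITION & SPEC =====
-- Pre_ excludes exactly the inputs on which the Python raises KeyError (both A and B do):
-- some n-gram t' that has a prefix occurring in n_tokens is missing from Fn_tok.
def Pre_cnt_overlaps (n_tokens : List String) (Fn_tok : List (String × Int)) (max_n : Int) : Prop :=
  (n_tokens.all (fun t' =>
    !(n_tokens.any (fun t => (pvPrefixes max_n t').contains t)) || (PySem.Dict.mk Fn_tok).contains t')) = true
instance (n_tokens : List String) (Fn_tok : List (String × Int)) (max_n : Int) : Decidable (Pre_cnt_overlaps n_tokens Fn_tok max_n) := by unfold Pre_cnt_overlaps; infer_instance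
def pvWitness_cnt_overlaps : List String × (List (String × Int)) × Int :=
  (["a", "a b"], [("a b", 3), ("a", 1)], 2)
def Spec_cnt_overlaps (n_tokens : List String) (Fn_tok : List (String × Int)) (max_n : Int) (out : List (String × List (String × Int))) : Prop := out = cnt_overlaps_alt n_tokens Fn_tok max_n
instance (n_tokens : List String) (Fn_tok : List (String × Int)) (max_n : Int) (out : List (String × List (String × Int))) : Decidable (Spec_cnt_overlaps n_tokens Fn_tok max_n out) := by unfold Spec_cnt_overlaps; infer_instance

-- ===== CLAIM (what is proved, stated in full; the proofs are below) =====
def Claim_equal_cnt_overlaps : Prop := ∀ (n_tokens : List String) (Fn_tok : List (String × Int)) (max_n : Int), Dom_cnt_overlaps n_tokens Fn_tok max_n → Pre_cnt_overlaps n_tokens Fn_tok max_n → Spec_cnt_overlaps n_tokens Fn_tok max_n (cnt_overlaps n_tokens Fn_tok max_n)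

-- ===== LEMMAS AND PROOFS =====

-- proof-only abbreviations
def pvF (Fn_tok : List (String × Int)) (s : String) : Int := (PySem.Dict.mk Fn_tok).getD s 0

def pvG (F : List (String × Int)) (L : List String) (d : PySem.Dict String Int) : PySem.Dict String Int :=
  L.foldl (fun d t' => d.insert t' (pvF F t')) d

-- the final list of targets A's index stores at key t (one copy per matching prefix occurrence)
def pvL (ns : List String) (mx : Int) (t : String) : List String :=
  ns.flatMap (fun t' => List.replicate ((pvPrefixes mx t').count t) t')

def pvInner (F : List (String × Int)) (ns : List String) (mx : Int) (t : String) : PySem.Dict String Int :=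
  pvG F (pvL ns mx t) PySem.Dict.empty

lemma pvG_cons (F : List (String × Int)) (y : String) (L : List String) (d : PySem.Dict String Int) :
    pvG F (y :: L) d = pvG F L (d.insert y (pvF F y)) := rfl

lemma pvG_append (F : List (String × Int)) (L1 L2 : List String) (d : PySem.Dict String Int) :
    pvG F (L1 ++ L2) d = pvG F L2 (pvG F L1 d) := List.foldl_append

lemma get?_pvG (F : List (String × Int)) (L : List String) :
    ∀ (d : PySem.Dict String Int) (x : String),
      (pvG F L d).get? x = if x ∈ L then some (pvF F x) else d.get? x := by
  induction L with
  | nil => intro d x; simp [pvG]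
  | cons y L ih =>
    intro d x
    rw [pvG_cons, ih]
    by_cases hL : x ∈ L
    · simp [hL]
    · by_cases hxy : x = y
      · subst hxy; simp [hL, PySem.Dict.get?_insert_self]
      · simp [hL, hxy, PySem.Dict.get?_insert_of_ne d (pvF F y) hxy]

lemma nodup_keys_pvG (F : List (String × Int)) (L : List String) (d : PySem.Dict String Int)
    (h : d.keys.Nodup) : (pvG F L d).keys.Nodup :=
  PySem.Dict.nodup_keys_foldl_insert L (fun _ t' => pvF F t') d h

lemma insert_noop (d : PySem.Dict String Int) (k : String) (v : Int)
    (hnd : d.keys.Nodup) (h : d.get? k = some v) : d.insert k v = d := by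
  apply PySem.Dict.ext
  have hc : d.contains k = true := by
    rw [PySem.Dict.contains_eq_isSome_get?, h]; rfl
  rw [PySem.Dict.items_insert_of_contains d v hc]
  have hpt : ∀ p ∈ d.items, (if p.1 == k then (k, v) else p) = p := by
    intro p hp
    by_cases hk : p.1 = k
    · have hmem : (k, p.2) ∈ d.items := by rw [← hk]; exact hp
      have := PySem.Dict.get?_of_mem_items d hmem hnd
      rw [h] at this
      simp only [hk, beq_self_eq_true, if_true]
      have hv : p.2 = v := by injection this with h2; omega
      rw [← hv, ← hk]
    · simp [hk]
  rw [List.map_congr_left hpt]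
  simp

lemma pvG_noop (F : List (String × Int)) :
    ∀ (L : List String) (d : PySem.Dict String Int), d.keys.Nodup →
      (∀ x ∈ L, d.get? x = some (pvF F x)) → pvG F L d = d := by
  intro L
  induction L with
  | nil => intro d _ _; rfl
  | cons y L ih =>
    intro d hnd h
    rw [pvG_cons, insert_noop d y _ hnd (h y (by simp))]
    exact ih d hnd (fun x hx => h x (by simp [hx]))

lemma pvG_replicate (F : List (String × Int)) (x : String) :
    ∀ (c : Nat) (d : PySem.Dict String Int),
      pvG F (List.replicate c x) d = if c = 0 then d else d.insert x (pvF F x) := by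
  intro c
  induction c with
  | zero => intro d; rfl
  | succ c ih =>
    intro d
    rw [List.replicate_succ, pvG_cons, ih]
    by_cases hc : c = 0
    · simp [hc]
    · simp [hc, PySem.Dict.insert_insert_self]

-- B's inner dict comprehension computes pvInner
lemma pvG_pvL (F : List (String × Int)) (mx : Int) (t : String) :
    ∀ (ns : List String) (d : PySem.Dict String Int),
      pvG F (pvL ns mx t) d =
      ns.foldl (fun inner t2 =>
        if (pvPrefixes mx t2).contains t then inner.insert t2 (pvF F t2) else inner) d := by
  intro ns
  induction ns with
  | nil => intro d; rfl
  | cons y ns ih =>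
    intro d
    have hL : pvL (y :: ns) mx t =
        List.replicate ((pvPrefixes mx y).count t) y ++ pvL ns mx t := by
      simp [pvL]
    rw [hL, pvG_append, pvG_replicate, List.foldl_cons, ← ih]
    by_cases hc : (pvPrefixes mx y).count t = 0
    · have hnm : t ∉ pvPrefixes mx y := by rwa [← List.count_eq_zero]
      simp [hc, hnm]
    · have hmem : t ∈ pvPrefixes mx y := by
        rw [← List.count_pos_iff]; omega
      simp [hc, hmem]

-- A's inner assignment loop over a nonempty target list is one insert of a pvG-extension
lemma modifyFold (F : List (String × Int)) (t : String) :
    ∀ (L : List String) (ov : PySem.Dict String (PySem.Dict String Int)), L ≠ [] →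
      L.foldl (fun ov t' =>
        ov.modify t PySem.Dict.empty (fun inner => inner.insert t' (pvF F t'))) ov
      = ov.insert t (pvG F L (ov.getD t PySem.Dict.empty)) := by
  intro L
  induction L with
  | nil => intro ov h; exact absurd rfl h
  | cons y L ih =>
    intro ov _
    rw [List.foldl_cons]
    have hmod : ov.modify t PySem.Dict.empty (fun inner => inner.insert y (pvF F y))
        = ov.insert t ((ov.getD t PySem.Dict.empty).insert y (pvF F y)) := rfl
    by_cases hL : L = []
    · subst hL
      rw [List.foldl_nil, hmod]; rfl
    · rw [hmod, ih _ hL, PySem.Dict.insert_insert_self]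
      congr 1
      rw [PySem.Dict.getD_insert_self]
      rfl

-- A's first phase: what the prefix index stores at key s
lemma ptt_getD (mx : Int) :
    ∀ (ns : List String) (d : PySem.Dict String (List String)) (s : String),
      (ns.foldl (fun d t' =>
        (PySem.List.pyRange 1 (min ((PySem.Str.split₀ t').length : Int) mx) 1).foldl
          (fun d k =>
            d.modify (PySem.Str.join " " (PySem.List.slice (PySem.Str.split₀ t') none (some k))) [] (· ++ [t'])) d) d).getD s []
      = d.getD s [] ++ pvL ns mx s := by
  intro ns
  induction ns with
  | nil => intro d s; simp [pvL]
  | cons y ns ih =>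
    intro d s
    rw [List.foldl_cons, ih]
    have hinner : ((PySem.List.pyRange 1 (min ((PySem.Str.split₀ y).length : Int) mx) 1).foldl
          (fun d k =>
            d.modify (PySem.Str.join " " (PySem.List.slice (PySem.Str.split₀ y) none (some k))) [] (· ++ [y])) d).getD s []
        = d.getD s [] ++ List.replicate ((pvPrefixes mx y).count s) y := by
      have h1 : ((pvPrefixes mx y).map (fun p => (p, y))).foldl
              (fun d q => d.modify q.1 [] (· ++ [q.2])) d
          = (PySem.List.pyRange 1 (min ((PySem.Str.split₀ y).length : Int) mx) 1).foldl
              (fun d k =>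
                d.modify (PySem.Str.join " " (PySem.List.slice (PySem.Str.split₀ y) none (some k))) [] (· ++ [y])) d := by
        simp only [pvPrefixes, List.map_map, List.foldl_map, Function.comp_def]
      rw [← h1, PySem.Dict.getD_foldl_modify_append]
      congr 1
      rw [List.filter_map, List.map_map]
      simp only [Function.comp_def]
      rw [List.map_const']
      congr 1
      rw [List.count, List.countP_eq_length_filter]
    rw [hinner]
    have hL : pvL (y :: ns) mx s =
        List.replicate ((pvPrefixes mx y).count s) y ++ pvL ns mx s := by simp [pvL]
    rw [hL, List.append_assoc]

lemma size_pvInner (F : List (String × Int)) (ns : List String) (mx : Int) (t : String) :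
    (pvInner F ns mx t).size = 0 ↔ pvL ns mx t = [] := by
  have hkeys : (pvInner F ns mx t).keys = PySem.Set.ofList (pvL ns mx t) := by
    show ((pvL ns mx t).foldl (fun d x => d.insert x (pvF F x)) PySem.Dict.empty).keys = _
    rw [PySem.Dict.keys_foldl_insert (pvL ns mx t) (fun _ x => pvF F x) PySem.Dict.empty]
    show PySem.Set.update [] (pvL ns mx t) = _
    exact PySem.Set.update_nil_left _
  have hsz : (pvInner F ns mx t).size = (pvInner F ns mx t).keys.length := by
    show (pvInner F ns mx t).items.length = ((pvInner F ns mx t).items.map (·.1)).length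
    rw [List.length_map]
  rw [hsz, hkeys]
  cases h : pvL ns mx t with
  | nil => simp [PySem.Set.ofList]
  | cons a l =>
    rw [PySem.Set.ofList_cons]
    simp

-- A's second phase rewritten as a conditional-insert loop over canonical inner dicts
lemma outerA (F : List (String × Int)) (ns : List String) (mx : Int) :
    ∀ (done : List String) (ov : PySem.Dict String (PySem.Dict String Int)),
      ov.keys.Nodup → (∀ t, ov.get? t = none ∨ ov.get? t = some (pvInner F ns mx t)) →
      done.foldl (fun ov t => (pvL ns mx t).foldl
        (fun ov t' => ov.modify t PySem.Dict.empty (fun inner => inner.insert t' (pvF F t'))) ov) ov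
      = done.foldl (fun ov t =>
          if pvL ns mx t = [] then ov else ov.insert t (pvInner F ns mx t)) ov := by
  intro done
  induction done with
  | nil => intro ov _ _; rfl
  | cons t done ih =>
    intro ov hnd hinv
    rw [List.foldl_cons, List.foldl_cons]
    by_cases hL : pvL ns mx t = []
    · rw [if_pos hL, hL, List.foldl_nil]
      exact ih ov hnd hinv
    · rw [modifyFold F t _ ov hL, if_neg hL]
      have hstep : pvG F (pvL ns mx t) (ov.getD t PySem.Dict.empty) = pvInner F ns mx t := by
        rcases hinv t with h | h
        · rw [PySem.Dict.getD_of_get?_eq_none ov PySem.Dict.empty h]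
          rfl
        · rw [PySem.Dict.getD_of_get?_eq_some ov PySem.Dict.empty h]
          refine pvG_noop F _ _ (nodup_keys_pvG F _ _ PySem.Dict.nodup_keys_empty) ?_
          intro x hx
          rw [show (pvInner F ns mx t).get? x = _ from get?_pvG F _ PySem.Dict.empty x]
          simp [hx]
      rw [hstep]
      refine ih _ (PySem.Dict.nodup_keys_insert ov t _ hnd) ?_
      intro u
      by_cases hu : u = t
      · subst hu
        right
        exact PySem.Dict.get?_insert_self ov u _
      · rw [PySem.Dict.get?_insert_of_ne ov _ hu]
        exact hinv u

-- the two ports agree (on every input)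
lemma cnt_overlaps_main (ns : List String) (F : List (String × Int)) (mx : Int) :
    cnt_overlaps ns F mx = cnt_overlaps_alt ns F mx := by
  unfold cnt_overlaps cnt_overlaps_alt
  have hF : ∀ s, (PySem.Dict.mk F).getD s 0 = pvF F s := fun _ => rfl
  have hptt : ∀ t, ((ns.foldl (fun d t' =>
      (PySem.List.pyRange 1 (min ((PySem.Str.split₀ t').length : Int) mx) 1).foldl
        (fun d k =>
          d.modify (PySem.Str.join " " (PySem.List.slice (PySem.Str.split₀ t') none (some k))) [] (· ++ [t'])) d)
      PySem.Dict.empty).getD t []) = pvL ns mx t := by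
    intro t
    rw [ptt_getD mx ns PySem.Dict.empty t]
    rfl
  simp only [hF, hptt]
  -- left side is now the outerA loop; right side folds B's comprehension
  rw [outerA F ns mx ns PySem.Dict.empty PySem.Dict.nodup_keys_empty (fun t => Or.inl rfl)]
  have hB : ∀ (t : String) (d : PySem.Dict String Int),
      (ns.map (fun t2 => (t2, pvPrefixes mx t2))).foldl
        (fun inner p => if p.2.contains t then inner.insert p.1 (pvF F p.1) else inner) d
      = pvG F (pvL ns mx t) d := by
    intro t d
    rw [List.foldl_map, pvG_pvL F mx t ns d]
  have hstep : ∀ (ov : PySem.Dict String (PySem.Dict String Int)) (t : String),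
      (if ((ns.map (fun t2 => (t2, pvPrefixes mx t2))).foldl
        (fun inner p => if p.2.contains t then inner.insert p.1 (pvF F p.1) else inner)
        PySem.Dict.empty).size == 0 then ov
       else ov.insert t ((ns.map (fun t2 => (t2, pvPrefixes mx t2))).foldl
        (fun inner p => if p.2.contains t then inner.insert p.1 (pvF F p.1) else inner)
        PySem.Dict.empty))
      = (if pvL ns mx t = [] then ov else ov.insert t (pvInner F ns mx t)) := by
    intro ov t
    rw [hB t PySem.Dict.empty]
    have hI : pvG F (pvL ns mx t) PySem.Dict.empty = pvInner F ns mx t := rfl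
    rw [hI]
    by_cases hL : pvL ns mx t = []
    · have h0 : (pvInner F ns mx t).size = 0 := (size_pvInner F ns mx t).mpr hL
      rw [if_pos hL]
      simp [h0]
    · have h0 : (pvInner F ns mx t).size ≠ 0 := fun h => hL ((size_pvInner F ns mx t).mp h)
      rw [if_neg hL]
      simp [h0]
  simp only [hstep]

-- ===== VERDICT (by name: the statement is the Claim_ definition above) =====
theorem cnt_overlaps_spec : Claim_equal_cnt_overlaps := by
  intro ns F mx _ _
  unfold Spec_cnt_overlaps
  exact cnt_overlaps_main ns F mx
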